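-- pv_equiv track=rewrite | github.com/digas99/tpr-project | baseCode2/baseExtractFeatures.py | extratctSilenceActivity
-- ===== SOURCE A (Python) =====
-- def extratctSilenceActivity(data,threshold=0):
--     if(data[0]<=threshold):
--         s=[1]
--         a=[]
--     else:
--         s=[]
--         a=[1]
--     for i in range(1,len(data)):
--         if(data[i-1]>threshold and data[i]<=threshold):
--             s.append(1)
--         elif(data[i-1]<=threshold and data[i]>threshold):
--             a.append(1)
--         elif (data[i-1]<=threshold and data[i]<=threshold):
--             s[-1]+=1
--         else:
--             a[-1]+=1
--     return(s,a)
-- ===== SOURCE B (Python) =====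
-- def extratctSilenceActivity(data, threshold=0):
--     s, a = [], []
--     i, n = 0, len(data)
--     while i < n:
--         silent = data[i] <= threshold
--         j = i + 1
--         while j < n and (data[j] <= threshold) == silent:
--             j += 1
--         (s if silent else a).append(j - i)
--         i = j
--     return (s, a)
-- ===== Notes on version B (the rewrite author's own statement) =====
-- stated objective: simpler
-- what changed: Replaces the adjacent-pair state machine (seeded from the first element, four prev/cur branch cases and s[-1]+=1 bookkeeping) by a single run-grouping scan that counts each maximal run of equal label x<=threshold and appends its length once.
import Mathlib
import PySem

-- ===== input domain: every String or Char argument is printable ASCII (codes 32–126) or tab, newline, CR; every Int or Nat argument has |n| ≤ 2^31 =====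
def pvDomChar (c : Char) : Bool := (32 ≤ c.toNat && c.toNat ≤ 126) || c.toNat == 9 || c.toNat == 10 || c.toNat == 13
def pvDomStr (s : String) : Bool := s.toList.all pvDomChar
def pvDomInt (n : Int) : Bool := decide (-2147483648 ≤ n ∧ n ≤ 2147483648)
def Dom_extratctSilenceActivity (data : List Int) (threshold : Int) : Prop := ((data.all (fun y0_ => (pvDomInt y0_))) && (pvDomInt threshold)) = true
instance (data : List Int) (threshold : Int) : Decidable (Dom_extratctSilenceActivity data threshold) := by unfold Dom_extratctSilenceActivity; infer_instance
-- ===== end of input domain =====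

-- B replaces A's adjacent-pair state machine by one run-grouping scan (objective: simpler); on empty data A raises IndexError while B returns ([], []) — excluded by Pre_.

-- ===== PORT A =====
-- s[-1] += 1 on a nonempty list: add 1 to the last element (A's lists are nonempty when this fires)
def pvIncLast : List Int → List Int
  | [] => []
  | [x] => [x + 1]
  | x :: y :: t => x :: pvIncLast (y :: t)

def extratctSilenceActivity (data : List Int) (threshold : Int) : List Int × List Int :=
  match PySem.List.pyGet? data 0 with
  | none => ([], [])  -- data[0] raises IndexError: excluded by Pre_
  | some d0 =>
    (PySem.List.pyRange 1 data.length 1).foldl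
      (fun (sa : List Int × List Int) i =>
        if PySem.List.pyGetD data (i - 1) 0 > threshold ∧ PySem.List.pyGetD data i 0 ≤ threshold then
          (sa.1 ++ [1], sa.2)
        else if PySem.List.pyGetD data (i - 1) 0 ≤ threshold ∧ PySem.List.pyGetD data i 0 > threshold then
          (sa.1, sa.2 ++ [1])
        else if PySem.List.pyGetD data (i - 1) 0 ≤ threshold ∧ PySem.List.pyGetD data i 0 ≤ threshold then
          (pvIncLast sa.1, sa.2)
        else
          (sa.1, pvIncLast sa.2))
      (if d0 ≤ threshold then ([1], []) else ([], [1]))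

-- ===== PORT B =====
-- one run-grouping scan: count the current maximal run of equal label (y ≤ threshold) in cnt,
-- emit the count when the label flips (Source B's inner j-counting loop)
def pvRunAux (threshold : Int) (silent : Bool) (cnt : Int) : List Int → List Int × List Int
  | [] => if silent then ([cnt], []) else ([], [cnt])
  | y :: ys =>
    if decide (y ≤ threshold) == silent then pvRunAux threshold silent (cnt + 1) ys
    else
      let G := pvRunAux threshold (decide (y ≤ threshold)) 1 ys
      if silent then (cnt :: G.1, G.2) else (G.1, cnt :: G.2)

def extratctSilenceActivity_alt (data : List Int) (threshold : Int) : List Int × List Int :=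
  match data with
  | [] => ([], [])
  | x :: xs => pvRunAux threshold (decide (x ≤ threshold)) 1 xs

-- ===== PRECONDITION & SPEC =====
-- Pre_ excludes only the empty list, on which A raises IndexError accessing the first element.
def Pre_extratctSilenceActivity (data : List Int) (threshold : Int) : Prop := data ≠ []
instance (data : List Int) (threshold : Int) : Decidable (Pre_extratctSilenceActivity data threshold) := by unfold Pre_extratctSilenceActivity; infer_instance
def pvWitness_extratctSilenceActivity : List Int × Int := ([1, -1, -2, 3], 0)

def Spec_extratctSilenceActivity (data : List Int) (threshold : Int) (out : List Int × List Int) : Prop := out = extratctSilenceActivity_alt data threshold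
instance (data : List Int) (threshold : Int) (out : List Int × List Int) : Decidable (Spec_extratctSilenceActivity data threshold out) := by unfold Spec_extratctSilenceActivity; infer_instance

-- ===== CLAIM (what is proved, stated in full; the proofs are below) =====
def Claim_equal_extratctSilenceActivity : Prop := ∀ (data : List Int) (threshold : Int), Dom_extratctSilenceActivity data threshold → Pre_extratctSilenceActivity data threshold → Spec_extratctSilenceActivity data threshold (extratctSilenceActivity data threshold)
-- ===== LEMMAS AND PROOFS =====

theorem pvIncLast_append (s0 : List Int) (c : Int) : pvIncLast (s0 ++ [c]) = s0 ++ [c + 1] := by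
  induction s0 with
  | nil => rfl
  | cons h t ih =>
    cases t with
    | nil => simp [pvIncLast]
    | cons h2 t2 => simpa [pvIncLast] using ih

-- A's loop body, abstracted over the two adjacent elements it reads
def pvStepA (threshold : Int) (sa : List Int × List Int) (p c : Int) : List Int × List Int :=
  if p > threshold ∧ c ≤ threshold then (sa.1 ++ [1], sa.2)
  else if p ≤ threshold ∧ c > threshold then (sa.1, sa.2 ++ [1])
  else if p ≤ threshold ∧ c ≤ threshold then (pvIncLast sa.1, sa.2)
  else (sa.1, pvIncLast sa.2)

-- A's loop as a structural fold over the tail, carrying the previous element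
def pvPairFold (threshold : Int) : List Int → Int → List Int × List Int → List Int × List Int
  | [], _, st => st
  | y :: ys, prev, st => pvPairFold threshold ys y (pvStepA threshold st prev y)

-- A's index loop over pyRange 1 len equals the structural pair fold
theorem pv_foldl_pairs (D : List Int) (threshold : Int) :
    ∀ (l : List Int) (k : Nat) (prev : Int) (st : List Int × List Int),
      D.drop k = prev :: l →
      (PySem.List.pyRange ((k : Int) + 1) D.length 1).foldl
        (fun sa i => pvStepA threshold sa (PySem.List.pyGetD D (i - 1) 0) (PySem.List.pyGetD D i 0)) st
      = pvPairFold threshold l prev st := by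
  intro l
  induction l with
  | nil =>
    intro k prev st h
    have hlen : D.length = k + 1 := by
      have := congrArg List.length h
      simp [List.length_drop] at this
      omega
    rw [PySem.List.pyRange_one_eq_nil (by simp [hlen])]
    rfl
  | cons y ys ih =>
    intro k prev st h
    have hlen : D.length = k + 1 + 1 + ys.length := by
      have := congrArg List.length h
      simp [List.length_drop] at this
      omega
    have hklt : ((k : Int) + 1) < D.length := by omega
    rw [PySem.List.pyRange_one_cons hklt, List.foldl_cons]
    have hdropk1 : D.drop (k + 1) = y :: ys := by
      have : D.drop (k + 1) = (D.drop k).tail := by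
        rw [← List.drop_drop]; simp
      rw [this, h]; rfl
    have hgetk : PySem.List.pyGetD D ((k : Int)) 0 = prev := by
      rw [PySem.List.pyGetD_natCast]
      have h0 : D[k]? = some prev := by
        have := congrArg (fun l => l[0]?) h
        simpa [List.getElem?_drop] using this
      simp [List.getD_eq_getElem?_getD, h0]
    have hgetk1 : PySem.List.pyGetD D ((k : Int) + 1) 0 = y := by
      have hcast : ((k : Int) + 1) = ((k + 1 : Nat) : Int) := by push_cast; ring
      rw [hcast, PySem.List.pyGetD_natCast]
      have h0 : D[k + 1]? = some y := by
        have := congrArg (fun l => l[0]?) hdropk1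
        simpa [List.getElem?_drop] using this
      simp [List.getD_eq_getElem?_getD, h0]
    have hidx : ((k : Int) + 1 - 1) = (k : Int) := by ring
    rw [hidx, hgetk, hgetk1]
    have hcast2 : ((k : Int) + 1 + 1) = (((k + 1 : Nat) : Int) + 1) := by push_cast; ring
    rw [hcast2, ih (k + 1) y _ hdropk1]
    rfl

-- the pair fold, started in the state A seeds, computes B's run scan (current run count carried in c)
theorem pv_pairFold_runAux (threshold : Int) :
    ∀ (l : List Int) (prev : Int) (s0 a0 : List Int) (c : Int),
      pvPairFold threshold l prev (if prev ≤ threshold then (s0 ++ [c], a0) else (s0, a0 ++ [c]))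
      = (s0 ++ (pvRunAux threshold (decide (prev ≤ threshold)) c l).1,
         a0 ++ (pvRunAux threshold (decide (prev ≤ threshold)) c l).2) := by
  intro l
  induction l with
  | nil =>
    intro prev s0 a0 c
    by_cases hp : prev ≤ threshold <;> simp [pvPairFold, pvRunAux, hp]
  | cons y ys ih =>
    intro prev s0 a0 c
    by_cases hp : prev ≤ threshold <;> by_cases hy : y ≤ threshold
    · -- both silent: the run continues, its count grows
      have hstep : pvStepA threshold (s0 ++ [c], a0) prev y = (s0 ++ [c + 1], a0) := by
        simp [pvStepA, hp, hy, not_lt.mpr hp, pvIncLast_append]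
      simp only [pvPairFold]
      rw [if_pos hp, hstep]
      have := ih y s0 a0 (c + 1)
      rw [if_pos hy] at this
      rw [this]
      simp [pvRunAux, hp, hy]
    · -- silent → active: emit the silent count, start an active run at 1
      have hstep : pvStepA threshold (s0 ++ [c], a0) prev y = (s0 ++ [c], a0 ++ [1]) := by
        simp [pvStepA, hp, hy, not_le.mp hy]
      simp only [pvPairFold]
      rw [if_pos hp, hstep]
      have := ih y (s0 ++ [c]) a0 1
      rw [if_neg hy] at this
      rw [this]
      simp [pvRunAux, hp, hy]
    · -- active → silent: emit the active count, start a silent run at 1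
      have hstep : pvStepA threshold (s0, a0 ++ [c]) prev y = (s0 ++ [1], a0 ++ [c]) := by
        simp [pvStepA, hy, not_le.mp hp]
      simp only [pvPairFold]
      rw [if_neg hp, hstep]
      have := ih y s0 (a0 ++ [c]) 1
      rw [if_pos hy] at this
      rw [this]
      simp [pvRunAux, hp, hy]
    · -- both active: the run continues, its count grows
      have hstep : pvStepA threshold (s0, a0 ++ [c]) prev y = (s0, a0 ++ [c + 1]) := by
        simp [pvStepA, hp, hy, pvIncLast_append]
      simp only [pvPairFold]
      rw [if_neg hp, hstep]
      have := ih y s0 a0 (c + 1)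
      rw [if_neg hy] at this
      rw [this]
      simp [pvRunAux, hp, hy]

-- ===== VERDICT (by name: the statement is the Claim_ definition above) =====
theorem extratctSilenceActivity_spec : Claim_equal_extratctSilenceActivity := by
  intro data threshold _ hpre
  unfold Spec_extratctSilenceActivity
  match data with
  | [] => exact absurd rfl hpre
  | x :: xs =>
    have hget : PySem.List.pyGet? (x :: xs) 0 = some x := by
      simp [PySem.List.pyGet?, PySem.List.pyIdx?]
    have hA : extratctSilenceActivity (x :: xs) threshold
        = pvPairFold threshold xs x (if x ≤ threshold then ([1], []) else ([], [1])) := by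
      have hfold := pv_foldl_pairs (x :: xs) threshold xs 0 x
        (if x ≤ threshold then ([1], []) else ([], [1])) (by simp)
      simp only [Nat.cast_zero, zero_add] at hfold
      unfold extratctSilenceActivity
      rw [hget]
      exact hfold
    have hseed : (if x ≤ threshold then (([1], []) : List Int × List Int) else ([], [1]))
        = (if x ≤ threshold then (([] : List Int) ++ [1], ([] : List Int)) else ([], ([] : List Int) ++ [1])) := by
      by_cases hx : x ≤ threshold <;> simp [hx]
    rw [hA, hseed, pv_pairFold_runAux threshold xs x [] [] 1]
    simp [extratctSilenceActivity_alt]
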